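-- pv_equiv track=rewrite | github.com/aaru9dua/Artificial_Intelligence | A* Heuristic/arrange_pichus.py | col_safety
-- ===== SOURCE A (Python) =====
-- def col_safety(grid,r,c):
--
--     #LOOP THROUGH COLUMNS
--     for y in range(c):
--
--         #Initiate count of pichu's in that COLUMN
--         Pcount=0
--
--         #move to next ROW
--         for x in range(r):
--
--             #if we found p here, increament the count
--             if 'p' in grid[x][y]:
--                 Pcount+=1
--
--             #if while traversing, wall ('X') came, reduce the count of p. because we can place p after this wall
--
--             elif 'X' in grid[x][y]:
--                 #don't do anything if P hasn't come in the column
--                 if Pcount==0: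
--                     pass
--                 else:
--                     Pcount-=1
--             #Same as row saftey logic
--             if Pcount ==2 :
--                 #Hence 'column clash' happen, discard the grid
--                 return False
--     #otherwise, grid is column safely
--     return True
-- ===== SOURCE B (Python) =====
-- def col_safety(grid, r, c):
--     # Row-major single pass keeping a per-column pichu counter vector.
--     counts = [0] * c
--     for _, row in zip(range(r), grid):
--         new = []
--         for cnt, cell in zip(counts, row):
--             if 'p' in cell:
--                 cnt += 1
--             elif 'X' in cell and cnt > 0:
--                 cnt -= 1
--             if cnt == 2:
--                 return False
--             new.append(cnt)
--         counts = new
--     return True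
-- ===== Notes on version B (the rewrite author's own statement) =====
-- stated objective: alternative
-- what changed: A scans column-major, restarting a single counter for each column; B makes one row-major pass over the grid maintaining a vector of per-column counters, visiting cells in a different order.
-- outside the precondition, e.g. on col_safety([['p'], ['p']], 2, 2): A returns False, B returns False; on col_safety([['p'], ['p']], 3, 1): A returns False, B returns False; on col_safety([['.', 'p'], ['p']], 2, 2): A raises IndexError, B returns True
import Mathlib
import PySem

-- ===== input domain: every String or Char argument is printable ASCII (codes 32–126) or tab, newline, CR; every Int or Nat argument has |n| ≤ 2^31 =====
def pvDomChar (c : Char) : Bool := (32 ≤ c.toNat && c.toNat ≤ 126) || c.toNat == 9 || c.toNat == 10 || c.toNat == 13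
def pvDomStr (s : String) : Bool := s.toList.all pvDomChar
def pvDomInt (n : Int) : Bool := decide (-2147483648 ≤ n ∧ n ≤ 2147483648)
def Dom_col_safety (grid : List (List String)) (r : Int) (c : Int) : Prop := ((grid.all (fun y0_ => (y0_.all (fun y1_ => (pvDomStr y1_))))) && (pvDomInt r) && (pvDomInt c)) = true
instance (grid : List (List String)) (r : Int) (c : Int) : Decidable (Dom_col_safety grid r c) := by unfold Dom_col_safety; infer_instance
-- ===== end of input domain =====

-- B replaces A's column-major double loop (restarting a counter per column) by a single
-- row-major pass maintaining a vector of per-column counters (objective: alternative).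

-- ===== PORT A =====
def pvInnerA (grid : List (List String)) (y : Int) : List Int → Int → Bool
  | [], _ => true
  | x :: xs, pc =>
    let cell := PySem.List.pyGetD (PySem.List.pyGetD grid x []) y ""
    let pc' := if PySem.Str.isIn "p" cell then pc + 1
               else if PySem.Str.isIn "X" cell then (if pc = 0 then pc else pc - 1)
               else pc
    if pc' = 2 then false else pvInnerA grid y xs pc'

def pvOuterA (grid : List (List String)) (r : Int) : List Int → Bool
  | [] => true
  | y :: ys => if pvInnerA grid y (PySem.List.pyRange 0 r 1) 0 then pvOuterA grid r ys else false

def col_safety (grid : List (List String)) (r : Int) (c : Int) : Bool :=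
  pvOuterA grid r (PySem.List.pyRange 0 c 1)

-- ===== PORT B =====
def pvStep (cell : String) (cnt : Int) : Int :=
  if PySem.Str.isIn "p" cell then cnt + 1
  else if PySem.Str.isIn "X" cell && decide (0 < cnt) then cnt - 1
  else cnt

def pvRowB : List (Int × String) → Option (List Int)
  | [] => some []
  | (cnt, cell) :: rest =>
    let cnt' := pvStep cell cnt
    if cnt' = 2 then none else (pvRowB rest).map (cnt' :: ·)

def pvOuterB : List (Int × List String) → List Int → Bool
  | [], _ => true
  | (_, row) :: xs, counts =>
    match pvRowB (counts.zip row) with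
    | none => false
    | some counts' => pvOuterB xs counts'

def col_safety_alt (grid : List (List String)) (r : Int) (c : Int) : Bool :=
  pvOuterB ((PySem.List.pyRange 0 r 1).zip grid) (List.replicate c.toNat 0)

-- ===== PRECONDITION & SPEC =====
-- Pre_ admits c ≤ 0 (neither program touches the grid) and otherwise restricts to rectangular
-- inputs (r ≤ len(grid), each of the first r rows ≥ c cells): outside that A's column-major
-- scan usually raises IndexError part-way while
-- B's zip-truncating row-major pass always returns, and where A's early False still beats the
-- IndexError that value is an accident of scan order, so no common behaviour is claimed there.
def Pre_col_safety (grid : List (List String)) (r : Int) (c : Int) : Prop :=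
  c ≤ 0 ∨ (r ≤ (grid.length : Int) ∧ ∀ row ∈ grid.take r.toNat, c ≤ (row.length : Int))
instance (grid : List (List String)) (r : Int) (c : Int) : Decidable (Pre_col_safety grid r c) := by
  unfold Pre_col_safety; infer_instance

def pvWitness_col_safety : List (List String) × Int × Int :=
  ([["p", "."], [".", "p"]], 2, 2)

def Spec_col_safety (grid : List (List String)) (r : Int) (c : Int) (out : Bool) : Prop := out = col_safety_alt grid r c
instance (grid : List (List String)) (r : Int) (c : Int) (out : Bool) : Decidable (Spec_col_safety grid r c out) := by unfold Spec_col_safety; infer_instance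

-- ===== CLAIM (what is proved, stated in full; the proofs are below) =====
def Claim_equal_col_safety : Prop := ∀ (grid : List (List String)) (r : Int) (c : Int), Dom_col_safety grid r c → Pre_col_safety grid r c → Spec_col_safety grid r c (col_safety grid r c)

-- ===== LEMMAS AND PROOFS =====

-- the per-column scan both programs implement: step the counter, fail on 2
def pvColScan : List String → Int → Bool
  | [], _ => true
  | cell :: rest, n =>
    let n' := pvStep cell n
    if n' = 2 then false else pvColScan rest n'

def pvColOf (rs : List (List String)) (k : Nat) : List String :=
  rs.map (fun row => row.getD k "")

-- pure (row-list) form of B's outer loop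
def pvOuterBPure : List (List String) → List Int → Bool
  | [], _ => true
  | row :: rest, counts =>
    match pvRowB (counts.zip row) with
    | none => false
    | some counts' => pvOuterBPure rest counts'

theorem pvInnerA_eq (grid : List (List String)) (y : Int) :
    ∀ (xs : List Int) (pc : Int), 0 ≤ pc →
      pvInnerA grid y xs pc
        = pvColScan (xs.map (fun x => PySem.List.pyGetD (PySem.List.pyGetD grid x []) y "")) pc := by
  intro xs
  induction xs with
  | nil => intro pc _; rfl
  | cons x xs ih =>
    intro pc hpc
    have hstep : ∀ cell : String,
        (if PySem.Str.isIn "p" cell then pc + 1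
         else if PySem.Str.isIn "X" cell then (if pc = 0 then pc else pc - 1) else pc)
          = pvStep cell pc := by
      intro cell
      simp only [pvStep, Bool.and_eq_true, decide_eq_true_eq]
      split_ifs <;> simp_all
      omega
    have hpos : ∀ cell : String, 0 ≤ pvStep cell pc := by
      intro cell
      simp only [pvStep, Bool.and_eq_true, decide_eq_true_eq]
      split_ifs <;> omega
    simp only [pvInnerA, List.map_cons, pvColScan, hstep]
    split_ifs with h
    · rfl
    · exact ih _ (hpos _)

theorem pvOuterA_all (grid : List (List String)) (r : Int) :
    ∀ ys : List Int, pvOuterA grid r ys = ys.all (fun y => pvInnerA grid y (PySem.List.pyRange 0 r 1) 0) := by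
  intro ys
  induction ys with
  | nil => rfl
  | cons y ys ih =>
    simp only [pvOuterA, List.all_cons, ih]
    cases pvInnerA grid y (PySem.List.pyRange 0 r 1) 0 <;> simp

theorem pvMapCell (grid : List (List String)) (r y : Int) (hy : 0 ≤ y)
    (hr : r.toNat ≤ grid.length) :
    (PySem.List.pyRange 0 r 1).map (fun x => PySem.List.pyGetD (PySem.List.pyGetD grid x []) y "")
      = pvColOf (grid.take r.toNat) y.toNat := by
  rw [PySem.List.pyRange_one, List.map_map]
  apply List.ext_getElem
  · simp only [List.length_map, List.length_range, pvColOf, List.length_take]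
    omega
  · intro i h1 h2
    simp only [List.length_map, List.length_range] at h1
    have hi : i < grid.length := by omega
    simp only [List.getElem_map, List.getElem_range, Function.comp_apply, pvColOf,
      List.getElem_take, zero_add]
    rw [PySem.List.pyGetD_natCast]
    rw [List.getD_eq_getElem?_getD, List.getElem?_eq_getElem hi]
    have hy' : y = ((y.toNat : Nat) : Int) := (Int.toNat_of_nonneg hy).symm
    conv_lhs => rw [hy']
    rw [PySem.List.pyGetD_natCast]
    simp

theorem pvRowB_char : ∀ l : List (Int × String),
    pvRowB l = if l.any (fun p => decide (pvStep p.2 p.1 = 2)) then none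
               else some (l.map (fun p => pvStep p.2 p.1)) := by
  intro l
  induction l with
  | nil => rfl
  | cons p rest ih =>
    obtain ⟨cnt, cell⟩ := p
    simp only [pvRowB, ih, List.any_cons, List.map_cons]
    by_cases h1 : pvStep cell cnt = 2
    · simp [h1]
    · by_cases h2 : rest.any (fun p => decide (pvStep p.2 p.1 = 2)) = true
      · simp [h1, h2]
      · simp [h1, h2]

theorem pvOuterBPure_spec : ∀ (rs : List (List String)) (cs : List Int),
    (∀ row ∈ rs, cs.length ≤ row.length) →
    (pvOuterBPure rs cs = true ↔
      ∀ k, k < cs.length → pvColScan (pvColOf rs k) (cs.getD k 0) = true) := by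
  intro rs
  induction rs with
  | nil => intro cs _; simp [pvOuterBPure, pvColOf, pvColScan]
  | cons row rest ih =>
    intro cs h
    have hlen : cs.length ≤ row.length := h row (by simp)
    have hrest : ∀ r' ∈ rest, cs.length ≤ r'.length := fun r' hr' => h r' (by simp [hr'])
    have hzlen : (cs.zip row).length = cs.length := by
      simp [List.length_zip]; omega
    have hiff : ((cs.zip row).any (fun p => decide (pvStep p.2 p.1 = 2)) = true) ↔
        ∃ k, k < cs.length ∧ pvStep (row.getD k "") (cs.getD k 0) = 2 := by
      rw [List.any_eq_true]
      constructor
      · rintro ⟨p, hp, hP⟩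
        obtain ⟨k, hk, he⟩ := List.mem_iff_getElem.1 hp
        have hk' : k < cs.length := by omega
        have hkr : k < row.length := by omega
        refine ⟨k, hk', ?_⟩
        rw [List.getElem_zip] at he
        rw [List.getD_eq_getElem cs 0 hk', List.getD_eq_getElem row "" hkr]
        simpa [← he] using hP
      · rintro ⟨k, hk, he⟩
        have hkr : k < row.length := by omega
        have hkz : k < (cs.zip row).length := by omega
        refine ⟨(cs.zip row)[k], List.getElem_mem hkz, ?_⟩
        rw [List.getElem_zip]
        simp only [decide_eq_true_eq]
        rw [List.getD_eq_getElem cs 0 hk, List.getD_eq_getElem row "" hkr] at he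
        exact he
    rw [show pvOuterBPure (row :: rest) cs
          = (match pvRowB (cs.zip row) with
             | none => false
             | some counts' => pvOuterBPure rest counts') from rfl]
    rw [pvRowB_char]
    by_cases hbad : ∃ k, k < cs.length ∧ pvStep (row.getD k "") (cs.getD k 0) = 2
    · have hany := hiff.2 hbad
      simp only [hany, if_true]
      constructor
      · intro hfalse; exact absurd hfalse (by simp)
      · intro hall
        obtain ⟨k, hk, he⟩ := hbad
        have := hall k hk
        simp only [pvColOf, List.map_cons, pvColScan, he] at this
        simp at this
    · have hany : (cs.zip row).any (fun p => decide (pvStep p.2 p.1 = 2)) = false := by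
        rw [← Bool.not_eq_true]; exact fun hc => hbad (hiff.1 hc)
      simp only [hany, Bool.false_eq_true, if_false]
      have hne : ∀ k, k < cs.length → pvStep (row.getD k "") (cs.getD k 0) ≠ 2 := by
        intro k hk hc; exact hbad ⟨k, hk, hc⟩
      have hlen' : ((cs.zip row).map (fun p => pvStep p.2 p.1)).length = cs.length := by
        simp [hzlen]
      have hget : ∀ k, k < cs.length →
          ((cs.zip row).map (fun p => pvStep p.2 p.1)).getD k 0
            = pvStep (row.getD k "") (cs.getD k 0) := by
        intro k hk
        have hkr : k < row.length := by omega
        have hkm : k < ((cs.zip row).map (fun p => pvStep p.2 p.1)).length := by omega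
        rw [List.getD_eq_getElem _ 0 hkm, List.getElem_map, List.getElem_zip,
          List.getD_eq_getElem cs 0 hk, List.getD_eq_getElem row "" hkr]
      rw [ih _ (by intro r' hr'; rw [hlen']; exact hrest r' hr')]
      rw [hlen']
      constructor
      · intro hall k hk
        have := hall k hk
        rw [hget k hk] at this
        simp only [pvColOf, List.map_cons, pvColScan]
        rw [if_neg (hne k hk)]
        exact this
      · intro hall k hk
        have := hall k hk
        rw [hget k hk]
        simp only [pvColOf, List.map_cons, pvColScan] at this
        rw [if_neg (hne k hk)] at this
        exact this

theorem pvOuterB_eq_pure : ∀ (l : List (Int × List String)) (cs : List Int),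
    pvOuterB l cs = pvOuterBPure (l.map Prod.snd) cs := by
  intro l
  induction l with
  | nil => intro cs; rfl
  | cons p xs ih =>
    intro cs
    obtain ⟨x, row⟩ := p
    show (match pvRowB (cs.zip row) with
          | none => false
          | some counts' => pvOuterB xs counts')
        = (match pvRowB (cs.zip row) with
           | none => false
           | some counts' => pvOuterBPure (xs.map Prod.snd) counts')
    cases pvRowB (cs.zip row) with
    | none => rfl
    | some cs' => simpa using ih cs'

theorem pvZipRange_snd (grid : List (List String)) (r : Int) :
    ((PySem.List.pyRange 0 r 1).zip grid).map Prod.snd = grid.take r.toNat := by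
  have hlen : (PySem.List.pyRange 0 r 1).length = r.toNat := by
    rw [PySem.List.length_pyRange_one]
    omega
  apply List.ext_getElem
  · simp [List.length_zip, hlen]
  · intro i h1 h2
    simp only [List.getElem_map, List.getElem_zip, List.getElem_take]

-- ===== VERDICT (by name: the statement is the Claim_ definition above) =====
theorem pvOuterB_nil_counts : ∀ l : List (Int × List String), pvOuterB l [] = true := by
  intro l
  induction l with
  | nil => rfl
  | cons p xs ih =>
    obtain ⟨x, row⟩ := p
    show (match pvRowB (List.zip [] row) with
          | none => false
          | some counts' => pvOuterB xs counts') = true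
    simpa [pvRowB] using ih

theorem col_safety_spec : Claim_equal_col_safety := by
  intro grid r c _dom hpre
  unfold Spec_col_safety
  rcases hpre with hc | ⟨hr, hrect⟩
  · rw [col_safety, PySem.List.pyRange_one_eq_nil (by omega : c ≤ 0)]
    rw [col_safety_alt, show c.toNat = 0 by omega, List.replicate_zero,
      pvOuterB_nil_counts]
    rfl
  have hrlen : r.toNat ≤ grid.length := by omega
  have hB : col_safety_alt grid r c
      = pvOuterBPure (grid.take r.toNat) (List.replicate c.toNat 0) := by
    rw [col_safety_alt, pvOuterB_eq_pure, pvZipRange_snd grid r]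
  have hrect' : ∀ row ∈ grid.take r.toNat, (List.replicate c.toNat (0:Int)).length ≤ row.length := by
    intro row hrow
    have := hrect row hrow
    simp only [List.length_replicate]
    omega
  have hBiff := pvOuterBPure_spec (grid.take r.toNat) (List.replicate c.toNat 0) hrect'
  have hgetd : ∀ k : Nat, k < c.toNat → (List.replicate c.toNat (0:Int)).getD k 0 = 0 := by
    intro k hk
    rw [List.getD_eq_getElem _ _ (by simpa using hk)]
    simp
  have hcol : ∀ y : Int, 0 ≤ y →
      pvInnerA grid y (PySem.List.pyRange 0 r 1) 0
        = pvColScan (pvColOf (grid.take r.toNat) y.toNat) 0 := by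
    intro y hy
    rw [pvInnerA_eq grid y (PySem.List.pyRange 0 r 1) 0 (le_refl 0),
      pvMapCell grid r y hy hrlen]
  rw [col_safety, pvOuterA_all, hB]
  rw [Bool.eq_iff_iff, List.all_eq_true, hBiff]
  simp only [List.length_replicate]
  constructor
  · intro hall k hk
    have hy := hall ((k : Int)) (by rw [PySem.List.mem_pyRange_one]; omega)
    rw [hcol ((k : Int)) (by omega)] at hy
    rw [hgetd k hk]
    simpa using hy
  · intro hall y hymem
    rw [PySem.List.mem_pyRange_one] at hymem
    rw [hcol y hymem.1]
    have hk : y.toNat < c.toNat := by omega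
    have := hall y.toNat hk
    rw [hgetd y.toNat hk] at this
    exact this
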